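-- pv_equiv track=rewrite | github.com/Adi77189/AI_Based_Detailed_Diagnostic_Report_Builder | src/extractor.py | refine_sentence
-- ===== SOURCE A (Python) =====
-- def refine_sentence(sentence):
--
--     sentence = sentence.strip()
--     lower = sentence.lower()
--
--     # issue keywords that should begin the real observation
--     core_issues = [
--         "leak", "leakage", "crack", "corrosion", "rust",
--         "overheat", "hot spot", "moisture", "damp",
--         "seepage", "mold", "damage", "fault", "burn",
--         "charring", "loose connection", "insulation"
--     ]
--
--     # find earliest occurrence of an issue keyword
--     start_positions = []
--
--     for word in core_issues:
--         pos = lower.find(word)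
--         if pos != -1:
--             start_positions.append(pos)
--
--     # if we found a keyword → cut everything before it
--     if start_positions:
--         start = min(start_positions)
--         sentence = sentence[start:]
--
--     # remove leftover junk characters
--     sentence = sentence.lstrip(" :-_.,;")
--
--     # Capitalize first letter
--     sentence = sentence[:1].upper() + sentence[1:]
--
--     return sentence
-- ===== SOURCE B (Python) =====
-- CORE_ISSUES = ("leak,leakage,crack,corrosion,rust,overheat,hot spot,moisture,damp,"
--                "seepage,mold,damage,fault,burn,charring,loose connection,insulation").split(",")
--
--
-- def refine_sentence(sentence):
--     s = sentence.strip()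
--     low = s.lower()
--     # single left-to-right scan: stop at the first index where any keyword starts
--     i, n = 0, len(low)
--     while i < n and not any(low.startswith(w, i) for w in CORE_ISSUES):
--         i += 1
--     if i < n:
--         s = s[i:]
--     # peel junk characters one by one from the front
--     while s and s[0] in " :-_.,;":
--         s = s[1:]
--     # uppercase the first character
--     return s[0].upper() + s[1:] if s else s
-- ===== Notes on version B (the rewrite author's own statement) =====
-- stated objective: alternative
-- what changed: Replaces A's per-keyword find() pass plus min() over collected positions with a single left-to-right index scan stopping at the first position where any keyword starts, and replaces the lstrip/slice-capitalize glue with explicit char-peeling loops and a head-match capitalization.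
import Mathlib
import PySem

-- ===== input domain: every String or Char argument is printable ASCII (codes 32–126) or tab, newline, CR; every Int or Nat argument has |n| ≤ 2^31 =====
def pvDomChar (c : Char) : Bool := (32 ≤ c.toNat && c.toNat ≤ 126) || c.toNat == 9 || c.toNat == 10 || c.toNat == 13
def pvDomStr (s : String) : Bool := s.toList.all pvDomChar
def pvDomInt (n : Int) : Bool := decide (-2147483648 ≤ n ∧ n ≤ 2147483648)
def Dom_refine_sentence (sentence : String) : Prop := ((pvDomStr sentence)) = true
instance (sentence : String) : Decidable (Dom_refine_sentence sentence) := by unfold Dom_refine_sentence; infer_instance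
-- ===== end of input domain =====

-- B replaces A's per-keyword find()+min pass by one index scan stopping at the first
-- keyword position, and the lstrip/capitalize glue by char-peeling loops (objective: alternative).

-- ===== PORT A =====
-- A's in-function keyword list
def coreIssuesA : List (List Char) :=
  ["leak".toList, "leakage".toList, "crack".toList, "corrosion".toList, "rust".toList,
   "overheat".toList, "hot spot".toList, "moisture".toList, "damp".toList,
   "seepage".toList, "mold".toList, "damage".toList, "fault".toList, "burn".toList,
   "charring".toList, "loose connection".toList, "insulation".toList]

def refine_sentence (sentence : String) : String :=
  let s := PySem.Chars.strip sentence.toList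
  let lower := PySem.Chars.lower s
  -- for word in core_issues: pos = lower.find(word); if pos != -1: start_positions.append(pos)
  let startPositions := coreIssuesA.foldl
    (fun acc w =>
      let pos := PySem.Chars.find lower w
      if pos != -1 then acc ++ [pos] else acc) ([] : List Int)
  -- if start_positions: sentence = sentence[min(start_positions):]
  let s := if startPositions ≠ [] then
      PySem.List.slice s (some ((PySem.List.min? startPositions id).getD 0)) none
    else s
  -- sentence.lstrip(" :-_.,;"): drop leading chars from the set (exact hand port; PySem has no chars-lstrip)
  let s := s.dropWhile (fun c => c ∈ " :-_.,;".toList)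
  -- sentence[:1].upper() + sentence[1:]
  let s := PySem.Chars.upper (PySem.List.slice s none (some 1)) ++ PySem.List.slice s (some 1) none
  String.ofList s

-- ===== PORT B =====
-- Source B's module-level list, built by splitting one comma-separated literal
def CORE_ISSUES : List (List Char) :=
  PySem.Chars.splitOn ("leak,leakage,crack,corrosion,rust,overheat,hot spot,moisture,damp," ++
    "seepage,mold,damage,fault,burn,charring,loose connection,insulation").toList ",".toList

-- any(low.startswith(w, i) for w in CORE_ISSUES); low.startswith(w, i) with 0 ≤ i ≤ len
-- is startswith on the i-th suffix (exact on that range)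
def issueAt (low : List Char) (i : Nat) : Bool :=
  CORE_ISSUES.any (fun w => PySem.Chars.startswith (low.drop i) w)

-- while i < n and not any(...): i += 1
def scanIdx (low : List Char) (i : Nat) : Nat :=
  if _h : i < low.length then
    if issueAt low i then i else scanIdx low (i + 1)
  else i
termination_by low.length - i

-- while s and s[0] in " :-_.,;": s = s[1:]
def dropJunk : List Char → List Char
  | [] => []
  | c :: rest => if c ∈ " :-_.,;".toList then dropJunk rest else c :: rest

-- s[0].upper() + s[1:] if s else s
def capFirst : List Char → List Char
  | [] => []
  | c :: rest => PySem.Chars.upper [c] ++ rest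

def refine_sentence_alt (sentence : String) : String :=
  let s := PySem.Chars.strip sentence.toList
  let low := PySem.Chars.lower s
  let i := scanIdx low 0
  let s := if i < low.length then s.drop i else s   -- s[i:] with 0 ≤ i is drop i
  String.ofList (capFirst (dropJunk s))

-- ===== PRECONDITION & SPEC =====
def Spec_refine_sentence (sentence : String) (out : String) : Prop := out = refine_sentence_alt sentence
instance (sentence : String) (out : String) : Decidable (Spec_refine_sentence sentence out) := by unfold Spec_refine_sentence; infer_instance

-- ===== CLAIM (what is proved, stated in full; the proofs are below) =====
def Claim_equal_refine_sentence : Prop := ∀ (sentence : String), Dom_refine_sentence sentence → Spec_refine_sentence sentence (refine_sentence sentence)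

-- ===== LEMMAS AND PROOFS =====

set_option maxRecDepth 10000 in
theorem coreIssues_eq : coreIssuesA = CORE_ISSUES := by decide

set_option maxRecDepth 10000 in
theorem coreIssues_ne_nil : ∀ w ∈ CORE_ISSUES, w ≠ [] := by decide

theorem issueAt_iff (L : List Char) (j : Nat) :
    issueAt L j = true ↔ ∃ w ∈ CORE_ISSUES, w <+: L.drop j := by
  simp [issueAt, List.any_eq_true, PySem.Chars.startswith_iff]

theorem issueAt_lt_length {L : List Char} {j : Nat} (h : issueAt L j = true) : j < L.length := by
  rcases (issueAt_iff L j).1 h with ⟨w, hw, hpre⟩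
  by_contra hge
  have : L.drop j = [] := List.drop_eq_nil_of_le (by omega)
  rw [this] at hpre
  exact coreIssues_ne_nil w hw (List.prefix_nil.1 hpre)

theorem scanIdx_none {L : List Char} (hall : ∀ j, issueAt L j = false) {i : Nat}
    (hi : i ≤ L.length) : scanIdx L i = L.length := by
  unfold scanIdx
  split
  · rw [hall i]
    simp only [if_false, Bool.false_eq_true]
    exact scanIdx_none hall (by omega)
  · omega
termination_by L.length - i

theorem scanIdx_some {L : List Char} {j : Nat} (hj : issueAt L j = true)
    (i : Nat) (hij : i ≤ j) (hmin : ∀ k, i ≤ k → k < j → issueAt L k = false) :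
    scanIdx L i = j := by
  have hjlen := issueAt_lt_length hj
  unfold scanIdx
  rw [dif_pos (by omega)]
  by_cases hi : i = j
  · subst hi; rw [hj]; simp
  · rw [hmin i le_rfl (by omega)]
    simp only [if_false, Bool.false_eq_true]
    exact scanIdx_some hj (i + 1) (by omega) (fun k hk1 hk2 => hmin k (by omega) hk2)
termination_by L.length - i

-- a keyword-prefix at position k forces find ≥ 0 and find ≤ k
theorem find_le_of_prefix_drop {L w : List Char} {k : Nat} (h : w <+: L.drop k) :
    0 ≤ PySem.Chars.find L w ∧ PySem.Chars.find L w ≤ (k : Int) := by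
  have hinf : w <:+: L := by
    rcases h with ⟨r, hr⟩
    exact ⟨L.take k, r, by rw [List.append_assoc, hr, List.take_append_drop]⟩
  have hnn : 0 ≤ PySem.Chars.find L w := (PySem.Chars.find_nonneg_iff L w).2 hinf
  refine ⟨hnn, ?_⟩
  have hspec := PySem.Chars.find_spec hnn
  by_contra hlt
  exact hspec.2 k (by omega) h

-- A's loop body result, via the generic loop-shape lemma
theorem startPositions_eq (L : List Char) :
    coreIssuesA.foldl
      (fun acc w =>
        let pos := PySem.Chars.find L w
        if pos != -1 then acc ++ [pos] else acc) ([] : List Int)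
      = (coreIssuesA.filter (fun w => PySem.Chars.find L w != -1)).map
          (fun w => PySem.Chars.find L w) := by
  simpa using PySem.List.foldl_append_if (fun w => PySem.Chars.find L w != -1)
    (fun w => PySem.Chars.find L w) coreIssuesA []

-- the only divergent step of the two programs agree
theorem cut_eq (s L : List Char) :
    (if (coreIssuesA.filter (fun w => PySem.Chars.find L w != -1)).map
          (fun w => PySem.Chars.find L w) ≠ [] then
        PySem.List.slice s
          (some ((PySem.List.min?
            ((coreIssuesA.filter (fun w => PySem.Chars.find L w != -1)).map
              (fun w => PySem.Chars.find L w)) id).getD 0)) none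
      else s)
    = (if scanIdx L 0 < L.length then s.drop (scanIdx L 0) else s) := by
  set ps := (coreIssuesA.filter (fun w => PySem.Chars.find L w != -1)).map
      (fun w => PySem.Chars.find L w) with hps
  by_cases hne : ps = []
  · -- no keyword occurs anywhere: both leave s unchanged
    rw [if_neg (by simp [hne])]
    have hall : ∀ j, issueAt L j = false := by
      intro j
      by_contra hj
      rcases (issueAt_iff L j).1 (by revert hj; cases issueAt L j <;> simp) with ⟨w, hw, hpre⟩
      have hfind := find_le_of_prefix_drop hpre
      have : PySem.Chars.find L w ∈ ps := by
        rw [hps]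
        refine List.mem_map.2 ⟨w, List.mem_filter.2 ⟨coreIssues_eq ▸ hw, ?_⟩, rfl⟩
        simp only [bne_iff_ne, ne_eq]
        omega
      simp [hne] at this
    rw [scanIdx_none hall (Nat.zero_le _), if_neg (by omega)]
  · rw [if_pos hne]
    obtain ⟨m, hm⟩ : ∃ m, PySem.List.min? ps id = some m := by
      cases h : PySem.List.min? ps id with
      | none => exact absurd ((PySem.List.min?_eq_none_iff ps id).1 h) hne
      | some m => exact ⟨m, rfl⟩
    have hmem := PySem.List.min?_mem hm
    have hmin := PySem.List.min?_isMin hm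
    -- m = find L w₀ for some found keyword w₀
    rcases List.mem_map.1 (hps ▸ hmem) with ⟨w₀, hw₀f, hmw₀⟩
    rcases List.mem_filter.1 hw₀f with ⟨hw₀, hfound⟩
    have hnn : 0 ≤ m := by
      have := PySem.Chars.neg_one_le_find L w₀
      simp only [bne_iff_ne, ne_eq] at hfound
      omega
    have hspec := PySem.Chars.find_spec (s := L) (sub := w₀) (by omega)
    -- issueAt holds at m.toNat
    have hmatch : issueAt L m.toNat = true := by
      refine (issueAt_iff L m.toNat).2 ⟨w₀, coreIssues_eq ▸ hw₀, ?_⟩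
      rw [show m.toNat = (PySem.Chars.find L w₀).toNat by omega]
      exact hspec.1
    -- nothing matches strictly before m.toNat
    have hbefore : ∀ k, 0 ≤ k → k < m.toNat → issueAt L k = false := by
      intro k _ hk
      by_contra hkm
      rcases (issueAt_iff L k).1 (by revert hkm; cases issueAt L k <;> simp) with ⟨w, hw, hpre⟩
      have hfk := find_le_of_prefix_drop hpre
      have hmemk : PySem.Chars.find L w ∈ ps := by
        rw [hps]
        refine List.mem_map.2 ⟨w, List.mem_filter.2 ⟨coreIssues_eq ▸ hw, ?_⟩, rfl⟩
        simp only [bne_iff_ne, ne_eq]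
        omega
      have := hmin _ hmemk
      simp only [id] at this
      omega
    rw [scanIdx_some hmatch 0 (Nat.zero_le _) (fun k _ => hbefore k (Nat.zero_le _)),
      if_pos (issueAt_lt_length hmatch), hm]
    simp only [Option.getD_some]
    rw [PySem.List.slice_from s (by omega)]
  -- glue: A's dropWhile equals B's junk-peel loop

theorem dropJunk_eq (s : List Char) :
    s.dropWhile (fun c => c ∈ " :-_.,;".toList) = dropJunk s := by
  induction s with
  | nil => rfl
  | cons c rest ih =>
    by_cases h : c ∈ " :-_.,;".toList
    · have h' : decide (c ∈ " :-_.,;".toList) = true := by simpa using h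
      rw [List.dropWhile_cons]
      simp only [h', if_true]
      rw [ih]
      simp only [dropJunk, if_pos h]
    · have h' : decide (c ∈ " :-_.,;".toList) = false := by simpa using h
      rw [List.dropWhile_cons]
      simp only [h', Bool.false_eq_true, if_false]
      simp only [dropJunk, if_neg h]

theorem capFirst_eq (s : List Char) :
    PySem.Chars.upper (PySem.List.slice s none (some 1)) ++ PySem.List.slice s (some 1) none
      = capFirst s := by
  cases s with
  | nil => rfl
  | cons c rest =>
    rw [show ((1 : Int)) = ((1 : Nat) : Int) by norm_num,
      PySem.List.slice_to_natCast, PySem.List.slice_from_natCast]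
    simp [capFirst]

-- ===== VERDICT (by name: the statement is the Claim_ definition above) =====
theorem refine_sentence_spec : Claim_equal_refine_sentence := by
  intro sentence _
  unfold Spec_refine_sentence refine_sentence refine_sentence_alt
  simp only []
  set s := PySem.Chars.strip sentence.toList
  set L := PySem.Chars.lower s
  rw [startPositions_eq L, cut_eq s L, dropJunk_eq, capFirst_eq]
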